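-- pv_equiv track=rewrite | github.com/adamdougal/advent-of-code-2023 | day-02/main.py | game_possible
-- ===== SOURCE A (Python) =====
-- def game_possible(game, max_colours):
--     for reveal in game:
--         for colour in max_colours:
--             if colour not in reveal:
--                 continue
--
--             if reveal[colour] > max_colours[colour]:
--                 return False
--
--     return True
-- ===== SOURCE B (Python) =====
-- def game_possible(game, max_colours):
--     # colour-major: aggregate the counts seen for each colour, then check once
--     for colour, limit in max_colours.items():
--         counts = [reveal[colour] for reveal in game if colour in reveal]
--         if counts and max(counts) > limit:
--             return False
--     return True
-- ===== Notes on version B (the rewrite author's own statement) =====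
-- stated objective: alternative
-- what changed: B swaps the traversal to colour-major and replaces the interleaved per-reveal early-exit checks by an aggregate-then-check pass: for each colour it collects all counts seen across the reveals and compares only their maximum against the limit.
import Mathlib
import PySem

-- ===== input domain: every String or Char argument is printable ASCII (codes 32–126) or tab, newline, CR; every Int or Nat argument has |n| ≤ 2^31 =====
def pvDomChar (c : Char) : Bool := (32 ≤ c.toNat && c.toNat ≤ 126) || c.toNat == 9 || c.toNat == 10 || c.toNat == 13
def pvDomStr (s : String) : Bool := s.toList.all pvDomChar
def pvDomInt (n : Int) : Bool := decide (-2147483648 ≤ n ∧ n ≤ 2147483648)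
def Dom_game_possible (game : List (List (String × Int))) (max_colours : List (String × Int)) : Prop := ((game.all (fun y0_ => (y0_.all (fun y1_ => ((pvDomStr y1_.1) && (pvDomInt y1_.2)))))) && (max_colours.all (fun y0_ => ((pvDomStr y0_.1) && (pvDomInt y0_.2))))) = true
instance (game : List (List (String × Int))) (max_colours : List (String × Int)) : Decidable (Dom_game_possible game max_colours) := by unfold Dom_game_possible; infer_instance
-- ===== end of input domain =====

-- B changes the decomposition: colour-major aggregate-then-check instead of A's reveal-major
-- interleaved early-exit checks (objective: alternative; return value only, no mutation).

-- ===== PORT A =====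
-- inner 'for colour in max_colours' loop of A over the remaining key/limit pairs l
-- (false = 'return False' was reached; 'colour not in reveal: continue' and 'reveal[colour]'
--  are the two arms of the match on get?; 'max_colours[colour]' is the first-match lookup,
--  total here because colour is a key of max_colours)
def gpInner (reveal mc : List (String × Int)) : List (String × Int) → Bool
  | [] => true
  | p :: rest =>
    match (PySem.Dict.mk reveal).get? p.1 with
    | none => gpInner reveal mc rest
    | some v =>
      if v > (PySem.Dict.mk mc).getD p.1 0 then false else gpInner reveal mc rest

-- outer 'for reveal in game' loop of A
def gpOuter (mc : List (String × Int)) : List (List (String × Int)) → Bool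
  | [] => true
  | reveal :: rest => if gpInner reveal mc mc then gpOuter mc rest else false

def game_possible (game : List (List (String × Int))) (max_colours : List (String × Int)) : Bool :=
  gpOuter max_colours game

-- ===== PORT B =====
-- B's 'for colour, limit in max_colours.items()' loop; counts is the list comprehension
-- '[reveal[colour] for reveal in game if colour in reveal]'; 'counts and max(counts) > limit'
-- is the match on max? (none exactly when counts is empty)
def gpAltLoop (game : List (List (String × Int))) : List (String × Int) → Bool
  | [] => true
  | (colour, limit) :: rest =>
    let counts := game.filterMap (fun reveal => (PySem.Dict.mk reveal).get? colour)
    match PySem.List.max? counts (fun y => y) with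
    | none => gpAltLoop game rest
    | some m => if m > limit then false else gpAltLoop game rest

def game_possible_alt (game : List (List (String × Int))) (max_colours : List (String × Int)) : Bool :=
  gpAltLoop game max_colours

-- ===== PRECONDITION & SPEC =====
-- Pre_ excludes only association lists whose max_colours part has duplicate keys: no Python
-- dict can contain a duplicate key, so such lists represent no input of the Python programs,
-- and on them A's first-match limit lookup and B's per-pair limit are both accidental.
def Pre_game_possible (game : List (List (String × Int))) (max_colours : List (String × Int)) : Prop :=
  (max_colours.map Prod.fst).Nodup
instance (game : List (List (String × Int))) (max_colours : List (String × Int)) : Decidable (Pre_game_possible game max_colours) := by unfold Pre_game_possible; infer_instance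

def pvWitness_game_possible : (List (List (String × Int))) × (List (String × Int)) :=
  ([[("red", 3), ("blue", 1)], [("red", 2)]], [("red", 4), ("blue", 2)])

def Spec_game_possible (game : List (List (String × Int))) (max_colours : List (String × Int)) (out : Bool) : Prop := out = game_possible_alt game max_colours
instance (game : List (List (String × Int))) (max_colours : List (String × Int)) (out : Bool) : Decidable (Spec_game_possible game max_colours out) := by unfold Spec_game_possible; infer_instance

-- ===== CLAIM (what is proved, stated in full; the proofs are below) =====
def Claim_equal_game_possible : Prop := ∀ (game : List (List (String × Int))) (max_colours : List (String × Int)), Dom_game_possible game max_colours → Pre_game_possible game max_colours → Spec_game_possible game max_colours (game_possible game max_colours)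

-- ===== LEMMAS AND PROOFS =====

-- A's inner loop succeeds iff every listed colour's count in this reveal is within its limit
theorem gpInner_eq_true_iff (reveal mc : List (String × Int)) (l : List (String × Int)) :
    gpInner reveal mc l = true ↔
      ∀ p ∈ l, ∀ v, (PySem.Dict.mk reveal).get? p.1 = some v →
        v ≤ (PySem.Dict.mk mc).getD p.1 0 := by
  induction l with
  | nil => simp [gpInner]
  | cons p rest ih =>
    simp only [gpInner]
    cases hg : (PySem.Dict.mk reveal).get? p.1 with
    | none =>
      simp only [ih, List.mem_cons]
      constructor
      · rintro h q (rfl | hq) v hv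
        · rw [hg] at hv; cases hv
        · exact h q hq v hv
      · intro h q hq v hv; exact h q (Or.inr hq) v hv
    | some v =>
      by_cases hv : v > (PySem.Dict.mk mc).getD p.1 0
      · simp only [if_pos hv]
        constructor
        · intro h; cases h
        · intro h
          have := h p (List.mem_cons_self ..) v hg
          omega
      · simp only [if_neg hv, ih, List.mem_cons]
        constructor
        · rintro h q (rfl | hq) w hw
          · rw [hg] at hw; injection hw with hw; omega
          · exact h q hq w hw
        · intro h q hq w hw; exact h q (Or.inr hq) w hw

-- A's outer loop succeeds iff every reveal passes the inner check
theorem gpOuter_eq_true_iff (mc : List (String × Int)) (game : List (List (String × Int))) :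
    gpOuter mc game = true ↔ ∀ r ∈ game, gpInner r mc mc = true := by
  induction game with
  | nil => simp [gpOuter]
  | cons r rest ih =>
    simp only [gpOuter]
    by_cases h : gpInner r mc mc = true
    · simp [h, ih]
    · simp [h]

-- B's loop succeeds iff every listed colour's aggregated counts all stay within its limit
theorem gpAltLoop_eq_true_iff (game : List (List (String × Int))) (l : List (String × Int)) :
    gpAltLoop game l = true ↔
      ∀ p ∈ l, ∀ v ∈ game.filterMap (fun r => (PySem.Dict.mk r).get? p.1), v ≤ p.2 := by
  induction l with
  | nil => simp [gpAltLoop]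
  | cons p rest ih =>
    obtain ⟨colour, limit⟩ := p
    simp only [gpAltLoop]
    cases hm : PySem.List.max? (game.filterMap (fun r => (PySem.Dict.mk r).get? colour)) (fun y => y) with
    | none =>
      have hnil := (PySem.List.max?_eq_none_iff _ _).mp hm
      simp only [ih, List.mem_cons]
      constructor
      · rintro h q (rfl | hq) v hv
        · rw [hnil] at hv; cases hv
        · exact h q hq v hv
      · intro h q hq v hv; exact h q (Or.inr hq) v hv
    | some m =>
      by_cases hlt : m > limit
      · simp only [if_pos hlt]
        constructor
        · intro h; cases h
        · intro h
          have hmem := PySem.List.max?_mem hm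
          have := h (colour, limit) (List.mem_cons_self ..) m hmem
          omega
      · simp only [if_neg hlt, ih, List.mem_cons]
        constructor
        · rintro h q (rfl | hq) v hv
          · have := PySem.List.max?_isMax hm v hv
            simp only at this
            omega
          · exact h q hq v hv
        · intro h q hq v hv; exact h q (Or.inr hq) v hv

-- ===== VERDICT (by name: the statement is the Claim_ definition above) =====
theorem game_possible_spec : Claim_equal_game_possible := by
  intro game mc _hdom hpre
  unfold Spec_game_possible game_possible game_possible_alt
  have hkeys : (PySem.Dict.mk mc).keys.Nodup := by
    simpa [PySem.Dict.keys_mk] using hpre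
  have hiff : gpOuter mc game = true ↔ gpAltLoop game mc = true := by
    rw [gpOuter_eq_true_iff, gpAltLoop_eq_true_iff]
    constructor
    · intro h p hp v hv
      rcases List.mem_filterMap.mp hv with ⟨r, hr, hget⟩
      have := (gpInner_eq_true_iff r mc mc).mp (h r hr) p hp v hget
      rwa [PySem.Dict.getD_of_mem_items (PySem.Dict.mk mc) (show (p.1, p.2) ∈ mc by simpa using hp) hkeys 0] at this
    · intro h r hr
      rw [gpInner_eq_true_iff]
      intro p hp v hget
      rw [PySem.Dict.getD_of_mem_items (PySem.Dict.mk mc) (show (p.1, p.2) ∈ mc by simpa using hp) hkeys 0]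
      exact h p hp v (List.mem_filterMap.mpr ⟨r, hr, hget⟩)
  cases ha : gpOuter mc game <;> cases hb : gpAltLoop game mc <;> simp_all
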